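-- pv_equiv track=rewrite | github.com/strelets-yaroslav/Algorithms-DS-in-Py | lesson_2/task_5.py | print_ascii_table
-- ===== SOURCE A (Python) =====
-- def print_ascii_table(first, last, n=10):
--     res = ''
--     for i in range(n):
--         symbol_code = first + i
--         if symbol_code > last:
--             return res
--         res += f'{symbol_code:>3} - {chr(symbol_code):<4}'
--     return res + '\n' + print_ascii_table(first + n, last, n)
-- ===== SOURCE B (Python) =====
-- def print_ascii_table(first, last, n=10):
--     res = ''
--     for k, code in enumerate(range(first, last + 1)):
--         if k > 0 and k % n == 0:
--             res += '\n'
--         res += f'{code:>3} - {chr(code):<4}'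
--     if first <= last and (last - first + 1) % n == 0:
--         res += '\n'
--     return res
-- ===== Notes on version B (the rewrite author's own statement) =====
-- stated objective: alternative
-- what changed: One flat enumerate loop over range(first, last+1) inserting '\n' before every n-th cell plus one final divisibility test for the trailing newline, instead of A's chunked tail-recursion; Pre_ excludes n<=0 (A recurses forever), codes where chr raises ValueError, and ranges touching the surrogate block 0xD800-0xDFFF, where A returns a lone-surrogate string not representable as a Lean String (B returns the identical string).
import Mathlib
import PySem

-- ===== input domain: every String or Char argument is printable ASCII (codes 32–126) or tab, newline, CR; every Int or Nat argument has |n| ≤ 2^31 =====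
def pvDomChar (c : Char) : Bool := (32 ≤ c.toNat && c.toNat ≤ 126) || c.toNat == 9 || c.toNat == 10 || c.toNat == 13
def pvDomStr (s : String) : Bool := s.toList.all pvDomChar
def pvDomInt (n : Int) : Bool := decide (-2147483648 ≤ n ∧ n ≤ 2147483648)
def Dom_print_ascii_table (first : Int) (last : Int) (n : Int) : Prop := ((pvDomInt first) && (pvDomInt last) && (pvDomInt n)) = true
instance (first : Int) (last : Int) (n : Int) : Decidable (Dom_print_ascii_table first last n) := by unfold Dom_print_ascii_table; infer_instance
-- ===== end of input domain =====

-- B replaces A's chunked tail-recursion by one flat enumerate loop (newline before every n-th cell,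
-- one divisibility test for the trailing newline); equivalence is proved on Pre_ below.

-- shared cell formatter: the f-string  f'{symbol_code:>3} - {chr(symbol_code):<4}'  both Pythons contain verbatim
def pvPad (w : Nat) (s : String) : String := String.ofList (List.replicate (w - s.toList.length) ' ')
def pvCell (code : Int) : String :=
  pvPad 3 (PySem.Int.toStr code) ++ PySem.Int.toStr code ++ " - " ++
    (String.ofList [Char.ofNat code.toNat] ++ pvPad 4 (String.ofList [Char.ofNat code.toNat]))

-- ===== PORT A =====
-- the inner 'for i in range(n)' loop, iterated lazily like Python's range (k counts the
-- remaining iterations, i is the loop variable): .inl res = early 'return res', .inr res = loop completed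
def pvALoop (first last : Int) : Nat → Int → String → String ⊕ String
  | 0, _, res => Sum.inr res
  | k + 1, i, res =>
    if first + i > last then Sum.inl res
    else pvALoop first last k (i + 1) (res ++ pvCell (first + i))

-- the tail recursion; fuel only makes it total (Python diverges for n ≤ 0, outside Pre_;
-- inside Pre_ the fuel passed below is never exhausted)
def pvARec : Nat → Int → Int → Int → String
  | 0, _, _, _ => ""
  | fuel + 1, first, last, n =>
    match pvALoop first last n.toNat 0 "" with
    | Sum.inl res => res
    | Sum.inr res => res ++ "\n" ++ pvARec fuel (first + n) last n

def print_ascii_table (first : Int) (last : Int) (n : Int) : String :=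
  pvARec ((last - first).toNat + 2) first last n

-- ===== PORT B =====
def print_ascii_table_alt (first : Int) (last : Int) (n : Int) : String :=
  let res :=
    (PySem.List.enumerate (PySem.List.pyRange first (last + 1) 1)).foldl
      (fun res kc =>
        (if 0 < kc.1 ∧ PySem.Int.mod kc.1 n = 0 then res ++ "\n" else res) ++ pvCell kc.2)
      ""
  if first ≤ last ∧ PySem.Int.mod (last - first + 1) n = 0 then res ++ "\n" else res

-- ===== PRECONDITION & SPEC =====
-- Pre_ excludes: n ≤ 0 (A recurses forever: RecursionError); codes where chr raises ValueError
-- (negative, or > 0x10FFFF); and ranges touching the surrogate block 0xD800–0xDFFF, where A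
-- returns a lone-surrogate string that is not a representable Lean String (B returns the
-- identical string there; see cites).
def Pre_print_ascii_table (first : Int) (last : Int) (n : Int) : Prop :=
  1 ≤ n ∧ (last < first ∨ (0 ≤ first ∧ last < 1114112 ∧ (last < 55296 ∨ 57343 < first)))
instance (first : Int) (last : Int) (n : Int) : Decidable (Pre_print_ascii_table first last n) := by
  unfold Pre_print_ascii_table; infer_instance
def pvWitness_print_ascii_table : Int × Int × Int := (65, 75, 4)

def Spec_print_ascii_table (first : Int) (last : Int) (n : Int) (out : String) : Prop := out = print_ascii_table_alt first last n
instance (first : Int) (last : Int) (n : Int) (out : String) : Decidable (Spec_print_ascii_table first last n out) := by unfold Spec_print_ascii_table; infer_instance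

-- ===== CLAIM (what is proved, stated in full; the proofs are below) =====
def Claim_equal_print_ascii_table : Prop := ∀ (first : Int) (last : Int) (n : Int), Dom_print_ascii_table first last n → Pre_print_ascii_table first last n → Spec_print_ascii_table first last n (print_ascii_table first last n)

-- ===== LEMMAS AND PROOFS =====

-- concatenation of the cells for the m codes first, first+1, …
def pvJoin : Int → Nat → String
  | _, 0 => ""
  | a, m + 1 => pvCell a ++ pvJoin (a + 1) m

-- the per-item contribution of B's loop body
def pvH (n : Int) (kc : Int × Int) : String :=
  (if 0 < kc.1 ∧ PySem.Int.mod kc.1 n = 0 then "\n" else "") ++ pvCell kc.2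

def pvJoinL : List String → String
  | [] => ""
  | s :: t => s ++ pvJoinL t

theorem pvJoinL_append (l1 l2 : List String) : pvJoinL (l1 ++ l2) = pvJoinL l1 ++ pvJoinL l2 := by
  induction l1 with
  | nil => simp [pvJoinL]
  | cons s t ih => simp [pvJoinL, ih, String.append_assoc]

-- B's foldl is an init-independent concatenation of per-item strings
theorem pvB_foldl_eq (n : Int) (l : List (Int × Int)) (s : String) :
    l.foldl (fun res kc =>
        (if 0 < kc.1 ∧ PySem.Int.mod kc.1 n = 0 then res ++ "\n" else res) ++ pvCell kc.2) s
      = s ++ pvJoinL (l.map (pvH n)) := by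
  induction l generalizing s with
  | nil => simp [pvJoinL]
  | cons kc t ih =>
    simp only [List.foldl_cons, List.map_cons, pvJoinL, ih, pvH]
    split_ifs <;> simp [String.append_assoc]

-- A's inner loop when no early return fires
theorem pvALoop_all (first last : Int) : ∀ (k : Nat) (i : Int) (res : String),
    (∀ j : Int, 0 ≤ j → j < (k : Int) → first + i + j ≤ last) →
    pvALoop first last k i res = Sum.inr (res ++ pvJoin (first + i) k) := by
  intro k
  induction k with
  | zero => intro i res _; simp [pvALoop, pvJoin, String.append_empty]
  | succ k ih =>
    intro i res h
    have h0 : first + i ≤ last := by have := h 0 (by omega) (by omega); omega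
    simp only [pvALoop, if_neg (by omega : ¬ first + i > last)]
    rw [ih (i + 1) _ (by intro j hj1 hj2; have := h (j + 1) (by omega) (by omega); omega)]
    rw [show first + (i + 1) = (first + i) + 1 by ring]
    simp [pvJoin, String.append_assoc]

-- A's inner loop when the early return fires at iteration m
theorem pvALoop_early (first last : Int) : ∀ (m k : Nat) (i : Int) (res : String), m < k →
    (∀ j : Int, 0 ≤ j → j < (m : Int) → first + i + j ≤ last) → first + i + (m : Int) > last →
    pvALoop first last k i res = Sum.inl (res ++ pvJoin (first + i) m) := by
  intro m
  induction m with
  | zero =>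
    intro k i res hk _ hm
    obtain ⟨k', rfl⟩ : ∃ k', k = k' + 1 := ⟨k - 1, by omega⟩
    simp only [pvALoop, if_pos (by omega : first + i > last)]
    simp [pvJoin, String.append_empty]
  | succ m ih =>
    intro k i res hk h hm
    obtain ⟨k', rfl⟩ : ∃ k', k = k' + 1 := ⟨k - 1, by omega⟩
    have h0 : first + i ≤ last := by have := h 0 (by omega) (by omega); omega
    simp only [pvALoop, if_neg (by omega : ¬ first + i > last)]
    rw [ih k' (i + 1) _ (by omega)
        (by intro j hj1 hj2; have := h (j + 1) (by omega) (by push_cast; omega); omega)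
        (by push_cast; push_cast at hm; omega)]
    rw [show first + (i + 1) = (first + i) + 1 by ring]
    simp [pvJoin, String.append_assoc]

theorem pvJoinL_cells_pyRange (m : Nat) : ∀ (a : Int),
    pvJoinL ((PySem.List.pyRange a (a + (m : Int)) 1).map pvCell) = pvJoin a m := by
  induction m with
  | zero => intro a; rw [PySem.List.pyRange_one_eq_nil (by omega)]; simp [pvJoinL, pvJoin]
  | succ m ih =>
    intro a
    rw [show (a + (((m:Nat) + 1 : Nat) : Int)) = (a + 1) + ((m : Nat) : Int) by push_cast; ring]
    rw [PySem.List.pyRange_one_cons (by omega)]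
    simp only [List.map_cons, pvJoinL, pvJoin]
    rw [ih (a + 1)]

theorem pvJoinL_map_cells_pyRange (a b : Int) (hab : a ≤ b) :
    pvJoinL ((PySem.List.pyRange a b 1).map pvCell) = pvJoin a (b - a).toNat := by
  have h := pvJoinL_cells_pyRange (b - a).toNat a
  rw [(by omega : a + (((b - a).toNat : Nat) : Int) = b)] at h
  exact h

-- mod facts (PySem.Int.mod = fmod; for a positive divisor it is emod)
theorem pvMod_pos (a n : Int) (hn : 0 < n) : PySem.Int.mod a n = a % n := by
  simp [PySem.Int.mod, Int.fmod_eq_emod, Or.inl (le_of_lt hn)]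

-- two starts congruent mod n (both positive) give the same joined tail
theorem pvH_shift (n : Int) (hn : 1 ≤ n) (l : List Int) :
    ∀ (a b : Int), 0 < a → 0 < b → a % n = b % n →
    pvJoinL ((PySem.List.enumerate l a).map (pvH n)) = pvJoinL ((PySem.List.enumerate l b).map (pvH n)) := by
  induction l with
  | nil => intro a b _ _ _; simp [PySem.List.enumerate_nil]
  | cons c t ih =>
    intro a b ha hb hab
    rw [PySem.List.enumerate_cons, PySem.List.enumerate_cons]
    simp only [List.map_cons, pvJoinL]
    have hhead : pvH n (a, c) = pvH n (b, c) := by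
      simp only [pvH, pvMod_pos _ _ (by omega : (0:Int) < n), hab, eq_true ha, eq_true hb, true_and]
    rw [hhead, ih (a+1) (b+1) (by omega) (by omega)
        (by rw [Int.add_emod a 1 n, Int.add_emod b 1 n, hab])]

-- indices 0..m-1 with m ≤ n fire no newline guard
theorem pvH_first_chunk (n : Int) (hn : 1 ≤ n) (l : List Int) :
    ∀ (a : Int), 0 ≤ a → a + l.length ≤ n →
    pvJoinL ((PySem.List.enumerate l a).map (pvH n)) = pvJoinL (l.map pvCell) := by
  induction l with
  | nil => intro a _ _; simp [PySem.List.enumerate_nil]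
  | cons c t ih =>
    intro a ha hlen
    rw [PySem.List.enumerate_cons]
    simp only [List.map_cons, pvJoinL, List.length_cons] at hlen ⊢
    have hhead : pvH n (a, c) = pvCell c := by
      simp only [pvH, pvMod_pos _ _ (by omega : (0:Int) < n)]
      rw [if_neg ?_, String.empty_append]
      rintro ⟨h1, h2⟩
      rw [Int.emod_eq_of_lt (by omega) (by omega)] at h2
      omega
    rw [hhead, ih (a+1) (by omega) (by omega)]

-- the main bridge: A's recursion equals B's flat loop + trailing test, for n ≥ 1 and enough fuel
theorem pvMain (n : Int) (hn : 1 ≤ n) (last : Int) :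
    ∀ (fuel : Nat) (first : Int), last - first < fuel →
    pvARec fuel first last n = print_ascii_table_alt first last n := by
  intro fuel
  induction fuel with
  | zero =>
    intro first hf
    have hlt : last < first := by omega
    simp only [pvARec, print_ascii_table_alt]
    rw [PySem.List.pyRange_one_eq_nil (by omega)]
    simp [PySem.List.enumerate_nil, if_neg (by omega : ¬ (first ≤ last ∧ PySem.Int.mod (last - first + 1) n = 0))]
  | succ fuel ih =>
    intro first hf
    by_cases hlt : last < first
    · -- empty table: early return at i = 0
      simp only [pvARec, print_ascii_table_alt]
      rw [pvALoop_early first last 0 n.toNat 0 "" (by omega) (by intro j h1 h2; omega)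
          (by push_cast; omega)]
      simp only [pvJoin, String.append_empty]
      rw [PySem.List.pyRange_one_eq_nil (by omega)]
      simp [PySem.List.enumerate_nil, if_neg (by omega : ¬ (first ≤ last ∧ PySem.Int.mod (last - first + 1) n = 0))]
    · by_cases hfull : first + n ≤ last + 1
      · -- full chunk: loop completes, newline, recurse
        have hsplitA : PySem.List.pyRange first (last+1) 1
            = PySem.List.pyRange first (first+n) 1 ++ PySem.List.pyRange (first+n) (last+1) 1 :=
          PySem.List.pyRange_one_append _ _ _ (by omega) (by omega)
        simp only [pvARec]
        rw [pvALoop_all first last n.toNat 0 "" (by intro j h1 h2; omega),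
            String.empty_append, (by ring : first + 0 = first)]
        rw [ih (first + n) (by omega)]
        -- unfold B on both sides
        simp only [print_ascii_table_alt]
        rw [hsplitA, PySem.List.enumerate_append]
        simp only [pvB_foldl_eq, String.empty_append, List.map_append, pvJoinL_append,
            PySem.List.length_pyRange_one]
        rw [pvH_first_chunk n hn (PySem.List.pyRange first (first+n) 1) 0 (by omega)
            (by rw [PySem.List.length_pyRange_one]; omega)]
        rw [pvJoinL_map_cells_pyRange first (first+n) (by omega)]
        have hm : (first + n - first).toNat = n.toNat := by omega
        rw [hm]
        rw [(by omega : ((0:Int) + ((n.toNat : Nat) : Int)) = n)]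
        by_cases h2 : first + n = last + 1
        · -- the chunk exactly exhausts the range
          rw [PySem.List.pyRange_one_eq_nil (by omega)]
          simp only [PySem.List.enumerate_nil, List.map_nil, pvJoinL, String.append_empty]
          rw [if_neg (by omega : ¬ (first + n ≤ last ∧ PySem.Int.mod (last - (first + n) + 1) n = 0))]
          rw [if_pos ⟨by omega, by
            rw [pvMod_pos _ _ (by omega : (0:Int) < n), (by omega : last - first + 1 = n)]
            exact Int.emod_self⟩]
          simp [String.append_empty]
        · -- more codes remain after the chunk
          have hne : PySem.List.pyRange (first+n) (last+1) 1
              = (first+n) :: PySem.List.pyRange (first+n+1) (last+1) 1 :=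
            PySem.List.pyRange_one_cons (by omega)
          -- shift the tail's indices from n down to 0, peeling the leading newline
          have hshift : pvJoinL ((PySem.List.enumerate (PySem.List.pyRange (first+n) (last+1) 1) n).map (pvH n))
              = "\n" ++ pvJoinL ((PySem.List.enumerate (PySem.List.pyRange (first+n) (last+1) 1) 0).map (pvH n)) := by
            rw [hne, PySem.List.enumerate_cons, PySem.List.enumerate_cons]
            simp only [List.map_cons, pvJoinL]
            rw [pvH_shift n hn _ (n + 1) (0 + 1) (by omega) (by omega)
                (by rw [show n + 1 = 1 + n * 1 by ring, Int.add_mul_emod_self_left]; norm_num)]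
            simp only [pvH, pvMod_pos _ _ (by omega : (0:Int) < n)]
            rw [if_pos ⟨by omega, Int.emod_self⟩, if_neg (by omega : ¬ ((0:Int) < 0 ∧ (0:Int) % n = 0))]
            simp [String.append_assoc]
          rw [hshift]
          -- trailing-newline guards agree
          have hmodstep : (last - first + 1) % n = (last - (first + n) + 1) % n := by
            rw [show last - first + 1 = (last - (first + n) + 1) + n * 1 by ring,
                Int.add_mul_emod_self_left]
          have hguard : (first ≤ last ∧ PySem.Int.mod (last - first + 1) n = 0)
              ↔ (first + n ≤ last ∧ PySem.Int.mod (last - (first + n) + 1) n = 0) := by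
            rw [pvMod_pos _ _ (by omega : (0:Int) < n), pvMod_pos _ _ (by omega : (0:Int) < n),
                hmodstep]
            constructor
            · rintro ⟨_, h⟩; exact ⟨by omega, h⟩
            · rintro ⟨_, h⟩; exact ⟨by omega, h⟩
          split_ifs with g1 g2 g2
          · simp [String.append_assoc]
          · exact absurd (hguard.mpr g1) g2
          · exact absurd (hguard.mp g2) g1
          · simp [String.append_assoc]
      · -- partial final chunk: early return inside the loop
        have hm0 : (0:Int) ≤ last + 1 - first := by omega
        set m : Int := last + 1 - first with hm
        have hmn : m < n := by omega
        simp only [pvARec]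
        rw [pvALoop_early first last m.toNat n.toNat 0 "" (by omega)
            (by intro j h1 h2; omega) (by push_cast; omega),
            String.empty_append, (by ring : first + 0 = first)]
        simp only [print_ascii_table_alt]
        simp only [pvB_foldl_eq, String.empty_append]
        rw [pvH_first_chunk n hn (PySem.List.pyRange first (last+1) 1) 0 (by omega)
            (by rw [PySem.List.length_pyRange_one]; omega)]
        rw [pvJoinL_map_cells_pyRange first (last+1) (by omega)]
        have : (last + 1 - first).toNat = m.toNat := by omega
        rw [this]
        rw [if_neg ?_]
        rintro ⟨_, hdvd⟩
        rw [pvMod_pos _ _ (by omega : (0:Int) < n), (by omega : last - first + 1 = m),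
            Int.emod_eq_of_lt (by omega) (by omega)] at hdvd
        omega

-- ===== VERDICT (by name: the statement is the Claim_ definition above) =====
theorem print_ascii_table_spec : Claim_equal_print_ascii_table := by
  intro first last n _ hpre
  obtain ⟨hn, _⟩ := hpre
  unfold Spec_print_ascii_table print_ascii_table
  exact pvMain n hn last _ first (by omega)
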